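-- pv_equiv track=rewrite | github.com/Diogoperei29/advent-of-code-2024 | 21/main.py | bfs_min_cost_paths
-- ===== SOURCE A (Python) =====
-- from collections import defaultdict, Counter, deque
--
-- DR = [(0,-1), (1,0), (0,1), (-1,0)]
--
-- CODEPAD = [['7', '8', '9'],
--            ['4', '5', '6'],
--            ['1', '2', '3'],
--            [' ', '0', 'A']]
--
-- def inbounds(x, y):
--     H, W = len(CODEPAD), len(CODEPAD[0])
--     if 0<=x<W and 0<=y<H:
--         return True
--     return False
--
-- def bfs_min_cost_paths(start, end):
--     queue = deque([(start, [start], 0)])  # (current position, path, cost)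
--     min_cost_paths = []
--     min_cost = float('inf')
--     while queue:
--         (x, y), path, cost = queue.popleft()
--
--         if (x, y) == end:
--             if cost < min_cost:
--                 min_cost = cost
--                 min_cost_paths = [path]
--             elif cost == min_cost:
--                 min_cost_paths.append(path)
--             continue
--
--         for (dx, dy) in DR:
--             nx, ny = x + dx, y + dy
--             if inbounds(nx, ny) and (nx, ny) not in path:
--                 if CODEPAD[ny][nx] != ' ':
--                     queue.append(((nx, ny), path + [(nx, ny)], cost + 1))
--
--     return min_cost_paths
-- ===== SOURCE B (Python) =====
-- DR = [(0,-1), (1,0), (0,1), (-1,0)]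
--
-- CODEPAD = [['7', '8', '9'],
--            ['4', '5', '6'],
--            ['1', '2', '3'],
--            [' ', '0', 'A']]
--
-- def bfs_min_cost_paths(start, end):
--     # Enumerate the shortest paths directly: only take steps that strictly
--     # decrease the Manhattan distance to `end` (trying directions in DR order,
--     # which yields exactly the BFS level order of the original).
--     ex, ey = end
--
--     def walk(pos, path):
--         if pos == end:
--             return [path]
--         x, y = pos
--         out = []
--         for dx, dy in DR:
--             nx, ny = x + dx, y + dy
--             if 0 <= nx < 3 and 0 <= ny < 4 and CODEPAD[ny][nx] != ' ':
--                 if abs(nx - ex) + abs(ny - ey) < abs(x - ex) + abs(y - ey):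
--                     out += walk((nx, ny), path + [(nx, ny)])
--         return out
--
--     return walk(start, [start])
-- ===== Notes on version B (the rewrite author's own statement) =====
-- stated objective: alternative
-- what changed: Replaces the exhaustive BFS over all simple keypad paths (queue with cost tracking) by a direct recursive enumerator that only takes steps strictly decreasing the Manhattan distance to the target, emitting exactly the shortest paths in the same DR/level order.
import Mathlib
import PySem

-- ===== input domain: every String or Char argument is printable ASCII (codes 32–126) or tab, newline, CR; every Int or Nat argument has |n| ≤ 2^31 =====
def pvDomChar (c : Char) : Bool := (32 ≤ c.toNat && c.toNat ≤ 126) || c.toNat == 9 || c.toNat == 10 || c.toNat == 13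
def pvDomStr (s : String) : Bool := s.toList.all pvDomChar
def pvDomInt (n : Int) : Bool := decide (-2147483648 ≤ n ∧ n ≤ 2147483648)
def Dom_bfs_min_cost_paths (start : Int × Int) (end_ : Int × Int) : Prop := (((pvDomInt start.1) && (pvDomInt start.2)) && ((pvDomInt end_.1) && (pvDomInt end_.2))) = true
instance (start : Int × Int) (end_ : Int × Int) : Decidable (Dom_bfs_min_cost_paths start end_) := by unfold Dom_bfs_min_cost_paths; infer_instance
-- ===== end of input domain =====

-- B replaces A's exhaustive BFS over all simple paths by a recursive enumerator of
-- distance-decreasing (i.e. shortest) paths only; same return value by a different algorithm.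

-- ===== PORT A =====
-- shared module constants DR and CODEPAD
def pvDR : List (Int × Int) := [(0,-1), (1,0), (0,1), (-1,0)]

def pvCODEPAD : List (List Char) :=
  [['7','8','9'], ['4','5','6'], ['1','2','3'], [' ','0','A']]

-- inbounds(x, y): H, W taken from CODEPAD exactly as in Python
def pvInbounds (x y : Int) : Bool :=
  if 0 ≤ x ∧ x < (pvCODEPAD.headI.length : Int) ∧ 0 ≤ y ∧ y < (pvCODEPAD.length : Int)
  then true else false

-- CODEPAD[ny][nx] (Python indexing; only evaluated under the inbounds guard)
def pvCell (x y : Int) : Option Char :=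
  (PySem.List.pyGet? pvCODEPAD y).bind (fun row => PySem.List.pyGet? row x)

-- a queue entry (current position, path, cost)
structure pvEnt where
  pos : Int × Int
  path : List (Int × Int)
  cost : Int
deriving Repr

-- the body of A's inner `for (dx, dy) in DR` loop: children appended to the queue
def pvKidsRaw (e : pvEnt) : List pvEnt :=
  pvDR.flatMap (fun d =>
    let n := (e.pos.1 + d.1, e.pos.2 + d.2)
    if pvInbounds n.1 n.2 = true ∧ n ∉ e.path then
      (if pvCell n.1 n.2 ≠ some ' ' then [⟨n, e.path ++ [n], e.cost + 1⟩] else [])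
    else [])

-- A's while loop (fuel only makes the recursion total; it is proved never to run out)
def pvLoop (end_ : Int × Int) : Nat → List pvEnt → Option Int → List (List (Int × Int)) → List (List (Int × Int))
  | 0, _, _, ps => ps
  | _ + 1, [], _, ps => ps
  | f + 1, e :: q, mc, ps =>
    if e.pos = end_ then
      match mc with
      | none => pvLoop end_ f q (some e.cost) [e.path]          -- cost < float('inf')
      | some m =>
        if e.cost < m then pvLoop end_ f q (some e.cost) [e.path]
        else if e.cost = m then pvLoop end_ f q mc (ps ++ [e.path])
        else pvLoop end_ f q mc ps
    else
      pvLoop end_ f (q ++ pvKidsRaw e) mc ps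

def bfs_min_cost_paths (start : Int × Int) (end_ : Int × Int) : List (List (Int × Int)) :=
  pvLoop end_ (2 ^ 40) [⟨start, [start], 0⟩] none []

-- ===== PORT B =====
-- abs(nx-ex)+abs(ny-ey): the Manhattan distance B steers by
def pvMdist (a b : Int × Int) : Nat := (a.1 - b.1).natAbs + (a.2 - b.2).natAbs

-- Source B's `walk`; the fuel (one more than the distance still to cover) only makes it total
def pvWalk (end_ : Int × Int) : Nat → (Int × Int) → List (Int × Int) → List (List (Int × Int))
  | 0, _, _ => []
  | f + 1, pos, path =>
    if pos = end_ then [path] else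
    pvDR.flatMap (fun d =>
      let nx := pos.1 + d.1
      let ny := pos.2 + d.2
      if (0 ≤ nx ∧ nx < 3 ∧ 0 ≤ ny ∧ ny < 4) ∧ pvCell nx ny ≠ some ' '
          ∧ pvMdist (nx, ny) end_ < pvMdist pos end_
      then pvWalk end_ f (nx, ny) (path ++ [(nx, ny)])
      else [])

def bfs_min_cost_paths_alt (start : Int × Int) (end_ : Int × Int) : List (List (Int × Int)) :=
  pvWalk end_ (pvMdist start end_ + 1) start [start]

-- ===== PRECONDITION & SPEC =====
def Spec_bfs_min_cost_paths (start : Int × Int) (end_ : Int × Int) (out : List (List (Int × Int))) : Prop := out = bfs_min_cost_paths_alt start end_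
instance (start : Int × Int) (end_ : Int × Int) (out : List (List (Int × Int))) : Decidable (Spec_bfs_min_cost_paths start end_ out) := by unfold Spec_bfs_min_cost_paths; infer_instance

-- ===== CLAIM (what is proved, stated in full; the proofs are below) =====
def Claim_equal_bfs_min_cost_paths : Prop := ∀ (start : Int × Int) (end_ : Int × Int), Dom_bfs_min_cost_paths start end_ → Spec_bfs_min_cost_paths start end_ (bfs_min_cost_paths start end_)

-- ===== LEMMAS AND PROOFS =====

-- state update performed by one pop of the queue (the `continue` branch)
def pvUpd (end_ : Int × Int) (s : Option Int × List (List (Int × Int))) (e : pvEnt) :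
    Option Int × List (List (Int × Int)) :=
  if e.pos = end_ then
    match s.1 with
    | none => (some e.cost, [e.path])
    | some m =>
      if e.cost < m then (some e.cost, [e.path])
      else if e.cost = m then (s.1, s.2 ++ [e.path])
      else s
  else s

-- children of an entry as BFS generates them (none once the target is reached)
def pvKids (end_ : Int × Int) (e : pvEnt) : List pvEnt :=
  if e.pos = end_ then [] else pvKidsRaw e

-- the queue after k whole BFS levels
def pvRound (end_ : Int × Int) : Nat → List pvEnt → List pvEnt
  | 0, q => q
  | k + 1, q => (pvRound end_ k q).flatMap (pvKids end_)

-- total number of pops in the first k levels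
def pvSum (end_ : Int × Int) : Nat → List pvEnt → Nat
  | 0, _ => 0
  | k + 1, q => q.length + pvSum end_ k (q.flatMap (pvKids end_))

-- the state after processing k whole levels
def pvStage (end_ : Int × Int) : Nat → List pvEnt → (Option Int × List (List (Int × Int))) → (Option Int × List (List (Int × Int)))
  | 0, _, s => s
  | k + 1, q, s => pvStage end_ k (q.flatMap (pvKids end_)) (q.foldl (pvUpd end_) s)

-- paths of the entries of a queue that sit on the target
def pvHits (end_ : Int × Int) (q : List pvEnt) : List (List (Int × Int)) :=
  q.filterMap (fun e => if e.pos = end_ then some e.path else none)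


-- ---- basic facts about rounds ----

lemma pvRound_succ_left (end_ : Int × Int) (k : Nat) (q : List pvEnt) :
    pvRound end_ (k + 1) q = pvRound end_ k (q.flatMap (pvKids end_)) := by
  induction k generalizing q with
  | zero => simp [pvRound]
  | succ k ih =>
    show (pvRound end_ (k + 1) q).flatMap _ = _
    rw [ih]
    rfl

lemma pvRound_nil (end_ : Int × Int) (k : Nat) : pvRound end_ k [] = [] := by
  induction k with
  | zero => rfl
  | succ k ih => simp [pvRound, ih]

lemma pvRound_append (end_ : Int × Int) (k : Nat) (a b : List pvEnt) :
    pvRound end_ k (a ++ b) = pvRound end_ k a ++ pvRound end_ k b := by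
  induction k generalizing a b with
  | zero => rfl
  | succ k ih => simp [pvRound, ih]

lemma pvRound_add (end_ : Int × Int) (a b : Nat) (q : List pvEnt) :
    pvRound end_ (a + b) q = pvRound end_ b (pvRound end_ a q) := by
  induction b with
  | zero => rfl
  | succ b ih => simp [pvRound, ih]

lemma pvHits_append (end_ : Int × Int) (a b : List pvEnt) :
    pvHits end_ (a ++ b) = pvHits end_ a ++ pvHits end_ b := by
  simp [pvHits]

lemma pvHits_round_flatMap (end_ : Int × Int) (n : Nat) (q : List pvEnt) :
    pvHits end_ (pvRound end_ n q) = q.flatMap (fun e => pvHits end_ (pvRound end_ n [e])) := by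
  induction q with
  | nil => simp [pvRound_nil, pvHits]
  | cons e q ih =>
    have : e :: q = [e] ++ q := rfl
    rw [this, pvRound_append, pvHits_append, ih]
    simp

lemma pvHits_nil_of (end_ : Int × Int) (q : List pvEnt) (h : ∀ e ∈ q, e.pos ≠ end_) :
    pvHits end_ q = [] := by
  induction q with
  | nil => rfl
  | cons e q ih =>
    have he := h e (by simp)
    simp only [pvHits, List.filterMap_cons, if_neg he]
    exact ih (fun e' h' => h e' (by simp [h']))

-- ---- geometry ----

lemma pvInbounds_iff (x y : Int) :
    pvInbounds x y = true ↔ (0 ≤ x ∧ x < 3 ∧ 0 ≤ y ∧ y < 4) := by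
  simp [pvInbounds, pvCODEPAD]

lemma pvCell_iff (x y : Int) (h : 0 ≤ x ∧ x < 3 ∧ 0 ≤ y ∧ y < 4) :
    (pvCell x y ≠ some ' ') ↔ ¬(x = 0 ∧ y = 3) := by
  obtain ⟨h1, h2, h3, h4⟩ := h
  interval_cases x <;> interval_cases y <;> decide

lemma pvStep_dist (d : Int × Int) (hd : d ∈ pvDR) (p e : Int × Int) :
    pvMdist (p.1 + d.1, p.2 + d.2) e = pvMdist p e + 1 ∨
    pvMdist (p.1 + d.1, p.2 + d.2) e + 1 = pvMdist p e := by
  fin_cases hd <;> simp [pvMdist] <;> omega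

lemma pvMdist_eq_zero (a b : Int × Int) : pvMdist a b = 0 ↔ a = b := by
  simp [pvMdist, Prod.ext_iff]
  omega

-- ---- membership in the child list ----

lemma pvKids_mem (end_ : Int × Int) (e c : pvEnt) (hc : c ∈ pvKids end_ e) :
    e.pos ≠ end_ ∧ ∃ d ∈ pvDR,
      c = ⟨(e.pos.1 + d.1, e.pos.2 + d.2), e.path ++ [(e.pos.1 + d.1, e.pos.2 + d.2)], e.cost + 1⟩ ∧
      pvInbounds (e.pos.1 + d.1) (e.pos.2 + d.2) = true ∧
      (e.pos.1 + d.1, e.pos.2 + d.2) ∉ e.path ∧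
      pvCell (e.pos.1 + d.1) (e.pos.2 + d.2) ≠ some ' ' := by
  by_cases hp : e.pos = end_
  · simp [pvKids, hp] at hc
  · refine ⟨hp, ?_⟩
    simp only [pvKids, if_neg hp, pvKidsRaw, List.mem_flatMap] at hc
    obtain ⟨d, hd, hc⟩ := hc
    refine ⟨d, hd, ?_⟩
    split_ifs at hc with h1 h2
    · simp at hc
      exact ⟨hc, h1.1, h1.2, h2⟩
    · simp at hc
    · simp at hc

-- ---- no path shorter than the Manhattan distance reaches the target ----

lemma pvNoHit (end_ : Int × Int) :
    ∀ (n : Nat) (e : pvEnt), n < pvMdist e.pos end_ →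
      pvHits end_ (pvRound end_ n [e]) = [] := by
  intro n
  induction n with
  | zero =>
    intro e he
    have : e.pos ≠ end_ := by
      intro h
      rw [← pvMdist_eq_zero e.pos end_] at h
      omega
    simp [pvRound, pvHits, this]
  | succ n ih =>
    intro e he
    rw [pvRound_succ_left]
    have hq : [e].flatMap (pvKids end_) = pvKids end_ e := by simp
    rw [hq, pvHits_round_flatMap]
    apply List.flatMap_eq_nil_iff.2
    intro c hc
    obtain ⟨-, d, hd, hceq, -, -, -⟩ := pvKids_mem end_ e c hc
    have hstep := pvStep_dist d hd e.pos end_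
    have hcpos : c.pos = (e.pos.1 + d.1, e.pos.2 + d.2) := by rw [hceq]
    apply ih
    rw [hcpos]
    omega

lemma pvLoop_step (end_ : Int × Int) (f : Nat) (e : pvEnt) (q : List pvEnt) (mc : Option Int) (ps : List (List (Int × Int))) :
    pvLoop end_ (f + 1) (e :: q) mc ps =
      pvLoop end_ f (q ++ pvKids end_ e) (pvUpd end_ (mc, ps) e).1 (pvUpd end_ (mc, ps) e).2 := by
  rcases mc with _ | m <;> simp only [pvLoop, pvUpd, pvKids] <;> split_ifs <;> simp

lemma pvLoop_shift (end_ : Int × Int) :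
    ∀ (q r : List pvEnt) (f : Nat) (mc : Option Int) (ps : List (List (Int × Int))),
      pvLoop end_ (q.length + f) (q ++ r) mc ps =
        pvLoop end_ f (r ++ q.flatMap (pvKids end_)) ((q.foldl (pvUpd end_) (mc, ps)).1) ((q.foldl (pvUpd end_) (mc, ps)).2) := by
  intro q
  induction q with
  | nil => intro r f mc ps; simp
  | cons e q ih =>
    intro r f mc ps
    have h1 : (e :: q).length + f = q.length + f + 1 := by simp [List.length_cons]; omega
    rw [h1, List.cons_append, pvLoop_step]
    have h2 : (q ++ r) ++ pvKids end_ e = q ++ (r ++ pvKids end_ e) := by simp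
    rw [h2, ih (r ++ pvKids end_ e) f _ _]
    simp [List.flatMap_cons, List.append_assoc]

lemma pvLoop_run (end_ : Int × Int) :
    ∀ (k : Nat) (q : List pvEnt) (f : Nat) (s : Option Int × List (List (Int × Int))),
      pvRound end_ k q = [] →
      pvLoop end_ (pvSum end_ k q + (f + 1)) q s.1 s.2 = (pvStage end_ k q s).2 := by
  intro k
  induction k with
  | zero =>
    intro q f s hq
    simp only [pvRound] at hq
    subst hq
    simp [pvStage, pvLoop]
  | succ k ih =>
    intro q f s hq
    have h1 : pvSum end_ (k+1) q + (f+1) = q.length + (pvSum end_ k (q.flatMap (pvKids end_)) + (f+1)) := by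
      simp [pvSum]; omega
    rw [h1]
    have h2 := pvLoop_shift end_ q [] (pvSum end_ k (q.flatMap (pvKids end_)) + (f+1)) s.1 s.2
    simp only [List.append_nil, List.nil_append] at h2
    rw [h2]
    have h3 : pvRound end_ k (q.flatMap (pvKids end_)) = [] := by
      rw [← pvRound_succ_left]; exact hq
    rw [ih _ f _ h3]
    simp [pvStage]

-- flatMap respects pointwise-equal functions
lemma pvFlatCongr {α β : Type} (l : List α) (f g : α → List β)
    (h : ∀ a ∈ l, f a = g a) : l.flatMap f = l.flatMap g := by
  induction l with
  | nil => rfl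
  | cons a l ih =>
    simp only [List.flatMap_cons]
    rw [h a (by simp), ih (fun a ha => h a (by simp [ha]))]

lemma pvFlatFlat {α β γ : Type} (l : List α) (f : α → List β) (g : β → List γ) :
    (l.flatMap f).flatMap g = l.flatMap (fun a => (f a).flatMap g) := by
  induction l with
  | nil => rfl
  | cons a l ih => simp [List.flatMap_cons, ih]

-- one direction of the inner loop: A's subtree hits = B's branch
lemma pvDirEq (end_ : Int × Int) (n : Nat) (pos : Int × Int) (path : List (Int × Int)) (cost : Int)
    (d : Int × Int) (hd : d ∈ pvDR) (hn : pvMdist pos end_ = n + 1)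
    (hp : ∀ q ∈ path, n + 1 ≤ pvMdist q end_)
    (ih : ∀ (pos' : Int × Int) (path' : List (Int × Int)) (cost' : Int),
        pvMdist pos' end_ = n → (∀ q ∈ path', n ≤ pvMdist q end_) →
        pvHits end_ (pvRound end_ n [⟨pos', path', cost'⟩]) = pvWalk end_ (n + 1) pos' path') :
    ((if pvInbounds (pos.1 + d.1) (pos.2 + d.2) = true ∧ (pos.1 + d.1, pos.2 + d.2) ∉ path then
        (if pvCell (pos.1 + d.1) (pos.2 + d.2) ≠ some ' ' then
          [pvEnt.mk (pos.1 + d.1, pos.2 + d.2) (path ++ [(pos.1 + d.1, pos.2 + d.2)]) (cost + 1)]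
        else [])
      else []).flatMap (fun c => pvHits end_ (pvRound end_ n [c])))
    = (if (0 ≤ pos.1 + d.1 ∧ pos.1 + d.1 < 3 ∧ 0 ≤ pos.2 + d.2 ∧ pos.2 + d.2 < 4) ∧
          pvCell (pos.1 + d.1) (pos.2 + d.2) ≠ some ' ' ∧
          pvMdist (pos.1 + d.1, pos.2 + d.2) end_ < pvMdist pos end_ then
        pvWalk end_ (n + 1) (pos.1 + d.1, pos.2 + d.2) (path ++ [(pos.1 + d.1, pos.2 + d.2)])
      else []) := by
  have hstep := pvStep_dist d hd pos end_
  have hstep := pvStep_dist d hd pos end_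
  simp only [pvInbounds_iff]
  split_ifs with h1 h2 h3 h4 h5 <;>
    simp only [List.flatMap_cons, List.flatMap_nil, List.append_nil]
  · -- in bounds, non-blank, monotone: recurse
    rcases hstep with ha | ht
    · exact absurd h3.2.2 (by omega)
    · have hdistc : pvMdist (pos.1 + d.1, pos.2 + d.2) end_ = n := by omega
      apply ih _ _ _ hdistc
      intro q hq
      rcases List.mem_append.1 hq with h | h
      · have := hp q h; omega
      · simp at h; subst h; omega
  · -- in bounds, non-blank, not monotone: subtree too far from target
    rcases hstep with ha | ht
    · exact pvNoHit end_ n ⟨(pos.1 + d.1, pos.2 + d.2), path ++ [(pos.1 + d.1, pos.2 + d.2)], cost + 1⟩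
        (by simp only []; omega)
    · exact absurd ⟨h1.1, h2, by omega⟩ h3
  · exact absurd h4.2.1 h2
  · refine absurd ⟨h5.1, fun hm => ?_⟩ h1
    have := hp _ hm
    have := h5.2.2
    omega

-- A's hits exactly at level `pvMdist pos end_` are B's walk
lemma pvMainM (end_ : Int × Int) :
    ∀ (n : Nat) (pos : Int × Int) (path : List (Int × Int)) (cost : Int),
      pvMdist pos end_ = n →
      (∀ q ∈ path, n ≤ pvMdist q end_) →
      pvHits end_ (pvRound end_ n [⟨pos, path, cost⟩]) = pvWalk end_ (n + 1) pos path := by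
  intro n
  induction n with
  | zero =>
    intro pos path cost hn _
    have : pos = end_ := (pvMdist_eq_zero pos end_).1 hn
    simp [pvRound, pvHits, pvWalk, this]
  | succ n ih =>
    intro pos path cost hn hp
    have hpos : pos ≠ end_ := by
      intro h
      rw [← pvMdist_eq_zero pos end_] at h
      omega
    rw [pvRound_succ_left]
    have hq : [pvEnt.mk pos path cost].flatMap (pvKids end_) = pvKids end_ ⟨pos, path, cost⟩ := by simp
    rw [hq, pvHits_round_flatMap]
    show (pvKids end_ ⟨pos, path, cost⟩).flatMap _ = pvWalk end_ (n + 1 + 1) pos path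
    rw [show pvKids end_ ⟨pos, path, cost⟩ = pvKidsRaw ⟨pos, path, cost⟩ from if_neg hpos]
    simp only [pvKidsRaw, pvWalk, if_neg hpos]
    rw [pvFlatFlat]
    apply pvFlatCongr
    intro d hd
    exact pvDirEq end_ n pos path cost d hd hn hp ih

-- ---- invariants of the BFS levels ----

def pvValid (c : Int × Int) : Prop :=
  (0 ≤ c.1 ∧ c.1 < 3 ∧ 0 ≤ c.2 ∧ c.2 < 4) ∧ c ≠ (0, 3)

def pvValidList : List (Int × Int) :=
  [(0,0),(1,0),(2,0),(0,1),(1,1),(2,1),(0,2),(1,2),(2,2),(1,3),(2,3)]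

lemma pvValid_mem (c : Int × Int) (h : pvValid c) : c ∈ pvValidList := by
  obtain ⟨⟨ha, hb, hc, hd⟩, hne⟩ := h
  obtain ⟨x, y⟩ := c
  simp only at ha hb hc hd
  interval_cases x <;> interval_cases y <;> first | decide | (exact absurd rfl hne)

lemma pvInv (start end_ : Int × Int) :
    ∀ (m : Nat) (e : pvEnt), e ∈ pvRound end_ m [⟨start, [start], 0⟩] →
      e.cost = (m : Int) ∧ e.path.Nodup ∧ e.path.length = m + 1 ∧
      e.pos ∈ e.path ∧ (∀ c ∈ e.path, c = start ∨ pvValid c) := by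
  intro m
  induction m with
  | zero =>
    intro e he
    simp only [pvRound, List.mem_singleton] at he
    subst he
    refine ⟨rfl, by simp, by simp, by simp, ?_⟩
    intro c hc
    simp at hc
    exact Or.inl hc
  | succ m ih =>
    intro e he
    simp only [pvRound, List.mem_flatMap] at he
    obtain ⟨p, hp, hek⟩ := he
    obtain ⟨hc0, hn0, hl0, hm0, hv0⟩ := ih p hp
    obtain ⟨-, d, hd, heq, hinb, hnotin, hcell⟩ := pvKids_mem end_ p e hek
    subst heq
    simp only
    refine ⟨by rw [hc0]; push_cast; ring, ?_, ?_, ?_, ?_⟩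
    · rw [List.nodup_append]
      refine ⟨hn0, List.nodup_singleton _, ?_⟩
      intro c hc1 c2 hc2
      rw [List.mem_singleton] at hc2
      subst hc2
      exact fun h => hnotin (h ▸ hc1)
    · simp [hl0]
    · simp
    · intro c hc
      rcases List.mem_append.1 hc with h | h
      · exact hv0 c h
      · simp at h
        subst h
        right
        rw [pvInbounds_iff] at hinb
        refine ⟨hinb, ?_⟩
        have := (pvCell_iff _ _ hinb).1 hcell
        intro hx
        apply this
        rw [Prod.ext_iff] at hx
        exact ⟨hx.1, hx.2⟩

lemma pvPigeon (start end_ : Int × Int) :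
    pvRound end_ 12 [⟨start, [start], 0⟩] = [] := by
  rw [List.eq_nil_iff_forall_not_mem]
  intro e he
  obtain ⟨-, hn, hl, -, hv⟩ := pvInv start end_ 12 e he
  have hsub : e.path ⊆ start :: pvValidList := by
    intro c hc
    rcases hv c hc with h | h
    · simp [h]
    · simp [pvValid_mem c h]
  have := (hn.subperm hsub).length_le
  rw [hl] at this
  simp [pvValidList] at this

-- ---- how the accumulator state evolves ----

lemma pvFold_noHits (end_ : Int × Int) :
    ∀ (q : List pvEnt) (s : Option Int × List (List (Int × Int))),
      pvHits end_ q = [] → q.foldl (pvUpd end_) s = s := by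
  intro q
  induction q with
  | nil => intro s _; rfl
  | cons e q ih =>
    intro s hq
    by_cases he : e.pos = end_
    · simp [pvHits, List.filterMap_cons, he] at hq
    · simp only [pvHits, List.filterMap_cons, if_neg he] at hq
      simp only [List.foldl_cons, pvUpd, if_neg he]
      exact ih s hq

lemma pvFold_tail (end_ : Int × Int) (m : Int) :
    ∀ (q : List pvEnt) (ps : List (List (Int × Int))),
      (∀ e ∈ q, e.cost = m) →
      q.foldl (pvUpd end_) (some m, ps) = (some m, ps ++ pvHits end_ q) := by
  intro q
  induction q with
  | nil => intro ps _; simp [pvHits]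
  | cons e q ih =>
    intro ps hc
    have hce := hc e (by simp)
    by_cases he : e.pos = end_
    · simp only [List.foldl_cons, pvUpd, if_pos he, hce, lt_irrefl, if_false, if_true]
      rw [ih (ps ++ [e.path]) (fun e' h' => hc e' (by simp [h']))]
      simp [pvHits, List.filterMap_cons, if_pos he]
    · simp only [List.foldl_cons, pvUpd, if_neg he]
      rw [ih ps (fun e' h' => hc e' (by simp [h']))]
      simp [pvHits, List.filterMap_cons, if_neg he]

lemma pvFold_first (end_ : Int × Int) (m : Int) :
    ∀ (q : List pvEnt),
      (∀ e ∈ q, e.cost = m) → pvHits end_ q ≠ [] →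
      q.foldl (pvUpd end_) (none, []) = (some m, pvHits end_ q) := by
  intro q
  induction q with
  | nil => intro _ h; simp [pvHits] at h
  | cons e q ih =>
    intro hc hne
    have hce := hc e (by simp)
    by_cases he : e.pos = end_
    · simp only [List.foldl_cons, pvUpd, if_pos he, hce]
      rw [pvFold_tail end_ m q [e.path] (fun e' h' => hc e' (by simp [h']))]
      simp [pvHits, List.filterMap_cons, if_pos he]
    · simp only [List.foldl_cons, pvUpd, if_neg he]
      have hq : pvHits end_ (e :: q) = pvHits end_ q := by
        simp [pvHits, if_neg he]
      rw [hq]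
      rw [hq] at hne
      exact ih (fun e' h' => hc e' (by simp [h'])) hne

lemma pvFold_late (end_ : Int × Int) (dd : Int) :
    ∀ (q : List pvEnt) (ps : List (List (Int × Int))),
      (∀ e ∈ q, dd < e.cost) →
      q.foldl (pvUpd end_) (some dd, ps) = (some dd, ps) := by
  intro q
  induction q with
  | nil => intro ps _; rfl
  | cons e q ih =>
    intro ps hc
    have hce := hc e (by simp)
    by_cases he : e.pos = end_
    · simp only [List.foldl_cons, pvUpd, if_pos he, if_neg (by omega : ¬ e.cost < dd),
        if_neg (by omega : ¬ e.cost = dd)]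
      exact ih ps (fun e' h' => hc e' (by simp [h']))
    · simp only [List.foldl_cons, pvUpd, if_neg he]
      exact ih ps (fun e' h' => hc e' (by simp [h']))

-- ---- state over whole levels ----

lemma pvStage_noHits (end_ : Int × Int) :
    ∀ (k : Nat) (q : List pvEnt) (s : Option Int × List (List (Int × Int))),
      (∀ m, m < k → pvHits end_ (pvRound end_ m q) = []) →
      pvStage end_ k q s = s := by
  intro k
  induction k with
  | zero => intro q s _; rfl
  | succ k ih =>
    intro q s h
    have h0 : pvHits end_ q = [] := h 0 (by omega)
    simp only [pvStage]
    rw [pvFold_noHits end_ q s h0]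
    apply ih
    intro m hm
    rw [← pvRound_succ_left]
    exact h (m + 1) (by omega)

lemma pvStage_add (end_ : Int × Int) :
    ∀ (a b : Nat) (q : List pvEnt) (s : Option Int × List (List (Int × Int))),
      pvStage end_ (a + b) q s = pvStage end_ b (pvRound end_ a q) (pvStage end_ a q s) := by
  intro a
  induction a with
  | zero => intro b q s; rw [Nat.zero_add]; rfl
  | succ a ih =>
    intro b q s
    have : a + 1 + b = (a + b) + 1 := by omega
    rw [this]
    show pvStage end_ (a + b) (q.flatMap (pvKids end_)) (q.foldl (pvUpd end_) s) = _
    rw [ih b (q.flatMap (pvKids end_)) (q.foldl (pvUpd end_) s)]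
    rw [← pvRound_succ_left]
    rfl

lemma pvStage_late (end_ : Int × Int) (dd : Int) :
    ∀ (k : Nat) (q : List pvEnt) (ps : List (List (Int × Int))),
      (∀ (m : Nat) (e : pvEnt), e ∈ pvRound end_ m q → dd < e.cost) →
      pvStage end_ k q (some dd, ps) = (some dd, ps) := by
  intro k
  induction k with
  | zero => intro q ps _; rfl
  | succ k ih =>
    intro q ps h
    simp only [pvStage]
    rw [pvFold_late end_ dd q ps (fun e he => h 0 e he)]
    apply ih
    intro m e he
    rw [← pvRound_succ_left] at he
    exact h (m + 1) e he

-- ---- fuel bound: 2^40 pops always suffice ----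

lemma pvKids_len (end_ : Int × Int) (e : pvEnt) : (pvKids end_ e).length ≤ 4 := by
  by_cases hp : e.pos = end_
  · simp [pvKids, hp]
  · simp only [pvKids, if_neg hp, pvKidsRaw, pvDR, List.flatMap_cons, List.flatMap_nil,
      List.length_append]
    split_ifs <;> simp

lemma pvFlat_len (end_ : Int × Int) :
    ∀ (q : List pvEnt), (q.flatMap (pvKids end_)).length ≤ 4 * q.length := by
  intro q
  induction q with
  | nil => simp
  | cons e q ih =>
    have := pvKids_len end_ e
    simp only [List.flatMap_cons, List.length_append, List.length_cons]
    omega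

lemma pvSum_le (end_ : Int × Int) :
    ∀ (k : Nat) (q : List pvEnt), pvSum end_ k q ≤ 5 ^ k * q.length := by
  intro k
  induction k with
  | zero => intro q; simp [pvSum]
  | succ k ih =>
    intro q
    have h1 := ih (q.flatMap (pvKids end_))
    have h2 := pvFlat_len end_ q
    have h3 : (5:Nat) ^ k * (q.flatMap (pvKids end_)).length ≤ 5 ^ k * (4 * q.length) :=
      Nat.mul_le_mul_left _ h2
    have h5 : 1 ≤ (5:Nat) ^ k := Nat.one_le_pow _ _ (by norm_num)
    have : pvSum end_ (k + 1) q = q.length + pvSum end_ k (q.flatMap (pvKids end_)) := rfl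
    rw [this, pow_succ]
    nlinarith

-- ---- B's walk: prefix independence and non-emptiness on the keypad ----

lemma pvWalk_append (end_ : Int × Int) :
    ∀ (f : Nat) (pos : Int × Int) (pre path : List (Int × Int)),
      pvWalk end_ f pos (pre ++ path) = (pvWalk end_ f pos path).map (pre ++ ·) := by
  intro f
  induction f with
  | zero => intro pos pre path; simp [pvWalk]
  | succ f ih =>
    intro pos pre path
    by_cases hp : pos = end_
    · simp [pvWalk, hp]
    · simp only [pvWalk, if_neg hp, List.map_flatMap]
      apply pvFlatCongr
      intro d hd
      split_ifs with h
      · rw [List.append_assoc]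
        exact ih _ pre _
      · simp

lemma pvWalk_ne_nil0 :
    ∀ (px py ex ey : Int), 0 ≤ px → px < 3 → 0 ≤ py → py < 4 → 0 ≤ ex → ex < 3 → 0 ≤ ey → ey < 4 →
      ¬(ex = 0 ∧ ey = 3) → pvWalk (ex, ey) (pvMdist (px, py) (ex, ey) + 1) (px, py) [] ≠ [] := by
  intro px py ex ey h1 h2 h3 h4 h5 h6 h7 h8 h9
  interval_cases px <;> interval_cases py <;> interval_cases ex <;> interval_cases ey <;>
    first
    | exact absurd ⟨rfl, rfl⟩ h9
    | decide

lemma pvWalk_ne_nil (end_ pos : Int × Int) (path : List (Int × Int))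
    (hpos : 0 ≤ pos.1 ∧ pos.1 < 3 ∧ 0 ≤ pos.2 ∧ pos.2 < 4) (hend : pvValid end_) :
    pvWalk end_ (pvMdist pos end_ + 1) pos path ≠ [] := by
  have h0 : pvWalk end_ (pvMdist pos end_ + 1) pos (path ++ []) =
      (pvWalk end_ (pvMdist pos end_ + 1) pos []).map (path ++ ·) :=
    pvWalk_append end_ _ pos path []
  rw [List.append_nil] at h0
  rw [h0]
  intro hmap
  rw [List.map_eq_nil_iff] at hmap
  obtain ⟨px, py⟩ := pos
  obtain ⟨ex, ey⟩ := end_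
  obtain ⟨hb, hne⟩ := hend
  refine pvWalk_ne_nil0 px py ex ey ?_ ?_ ?_ ?_ ?_ ?_ ?_ ?_ ?_ hmap
  · exact hpos.1
  · exact hpos.2.1
  · exact hpos.2.2.1
  · exact hpos.2.2.2
  · exact hb.1
  · exact hb.2.1
  · exact hb.2.2.1
  · exact hb.2.2.2
  · intro hx
    apply hne
    simp [Prod.ext_iff, hx.1, hx.2]

-- an out-of-grid cell enters the grid only by moving toward any on-grid target
lemma pvEntry_mono (d : Int × Int) (hd : d ∈ pvDR) (sx sy ex ey : Int)
    (hs : ¬(0 ≤ sx ∧ sx < 3 ∧ 0 ≤ sy ∧ sy < 4))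
    (hb : 0 ≤ sx + d.1 ∧ sx + d.1 < 3 ∧ 0 ≤ sy + d.2 ∧ sy + d.2 < 4)
    (he : 0 ≤ ex ∧ ex < 3 ∧ 0 ≤ ey ∧ ey < 4) :
    pvMdist (sx + d.1, sy + d.2) (ex, ey) < pvMdist (sx, sy) (ex, ey) := by
  fin_cases hd <;> simp only [pvMdist] at * <;> omega

-- one unfolding step of B's walk
lemma pvWalk_succ (end_ : Int × Int) (f : Nat) (pos : Int × Int) (path : List (Int × Int)) :
    pvWalk end_ (f + 1) pos path =
      if pos = end_ then [path] else
      pvDR.flatMap (fun d =>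
        if (0 ≤ pos.1 + d.1 ∧ pos.1 + d.1 < 3 ∧ 0 ≤ pos.2 + d.2 ∧ pos.2 + d.2 < 4) ∧
            pvCell (pos.1 + d.1) (pos.2 + d.2) ≠ some ' ' ∧
            pvMdist (pos.1 + d.1, pos.2 + d.2) end_ < pvMdist pos end_
        then pvWalk end_ f (pos.1 + d.1, pos.2 + d.2) (path ++ [(pos.1 + d.1, pos.2 + d.2)])
        else []) := rfl

-- ---- the assembly: A's BFS equals B's shortest-path walk ----

theorem pvMain (start end_ : Int × Int) :
    bfs_min_cost_paths start end_ = bfs_min_cost_paths_alt start end_ := by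
  have hrun : bfs_min_cost_paths start end_ =
      (pvStage end_ 12 [⟨start, [start], 0⟩] (none, [])).2 := by
    have hsum := pvSum_le end_ 12 [(⟨start, [start], 0⟩ : pvEnt)]
    have h512 : (5:Nat) ^ 12 * ([(⟨start, [start], 0⟩ : pvEnt)]).length = 244140625 := by
      norm_num
    rw [h512] at hsum
    have hfuel : (2:Nat) ^ 40 = pvSum end_ 12 [⟨start, [start], 0⟩] +
        ((2 ^ 40 - pvSum end_ 12 [⟨start, [start], 0⟩] - 1) + 1) := by
      have : (2:Nat) ^ 40 = 1099511627776 := by norm_num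
      omega
    show pvLoop end_ (2 ^ 40) [⟨start, [start], 0⟩] none [] = _
    rw [hfuel]
    exact pvLoop_run end_ 12 [⟨start, [start], 0⟩] _ (none, []) (pvPigeon start end_)
  have hB : bfs_min_cost_paths_alt start end_ =
      pvHits end_ (pvRound end_ (pvMdist start end_) [⟨start, [start], 0⟩]) := by
    symm
    exact pvMainM end_ (pvMdist start end_) start [start] 0 rfl
      (by intro q hq; rw [List.mem_singleton] at hq; subst hq; exact le_refl _)
  by_cases hd12 : pvMdist start end_ < 12
  · have hpre : pvStage end_ (pvMdist start end_) [⟨start, [start], 0⟩] (none, []) = (none, []) :=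
      pvStage_noHits end_ _ _ _ (fun m hm => pvNoHit end_ m ⟨start, [start], 0⟩ (by simpa using hm))
    by_cases hH : pvHits end_ (pvRound end_ (pvMdist start end_) [⟨start, [start], 0⟩]) = []
    · -- B returns no path; A explores everything and also finds none
      rw [hB, hH, hrun]
      have hBnil : pvWalk end_ (pvMdist start end_ + 1) start [start] = [] := by
        have : bfs_min_cost_paths_alt start end_ = [] := by rw [hB, hH]
        exact this
      by_cases hev : pvValid end_
      · by_cases hsg : 0 ≤ start.1 ∧ start.1 < 3 ∧ 0 ≤ start.2 ∧ start.2 < 4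
        · exact absurd hBnil (pvWalk_ne_nil end_ start [start] hsg hev)
        · -- start outside the pad and its entry step would be monotone: no children at all
          have hkids : pvKids end_ ⟨start, [start], 0⟩ = [] := by
            rw [List.eq_nil_iff_forall_not_mem]
            intro c hc
            obtain ⟨hpne, d, hd, hceq, hinb, hnotin, hcell⟩ :=
              pvKids_mem end_ ⟨start, [start], 0⟩ c hc
            simp only at hinb hnotin hcell
            rw [pvInbounds_iff] at hinb
            have hmono := pvEntry_mono d hd start.1 start.2 end_.1 end_.2 hsg hinb
              (by obtain ⟨hb, -⟩ := hev; exact hb)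
            -- then B's branch in this direction is nonempty, contradicting hBnil
            have hstep := pvStep_dist d hd start end_
            have hspos : start ≠ end_ := by
              intro h
              apply hsg
              obtain ⟨hb, -⟩ := hev
              rw [h]
              exact hb
            have hdpos : 0 < pvMdist start end_ := by
              rcases Nat.eq_zero_or_pos (pvMdist start end_) with h | h
              · exact absurd ((pvMdist_eq_zero start end_).1 h) hspos
              · exact h
            simp only [Prod.mk.eta] at hmono
            have hdc : pvMdist (start.1 + d.1, start.2 + d.2) end_ + 1 = pvMdist start end_ := by
              rcases hstep with h | h
              · omega
              · exact h
            rw [pvWalk_succ, if_neg hspos, List.flatMap_eq_nil_iff] at hBnil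
            have hbr := hBnil d hd
            rw [if_pos ⟨hinb, hcell, hmono⟩] at hbr
            rw [← hdc] at hbr
            exact pvWalk_ne_nil end_ _ _ hinb hev hbr

          have hall : ∀ m, m < 12 → pvHits end_ (pvRound end_ m [⟨start, [start], 0⟩]) = [] := by
            intro m hm
            rcases m with _ | m
            ·
              apply pvHits_nil_of
              intro e he
              simp only [pvRound] at he
              rw [List.mem_singleton] at he
              subst he
              intro h
              apply hsg
              obtain ⟨hb, -⟩ := hev
              rw [show (pvEnt.mk start [start] 0).pos = start from rfl] at h
              rw [h]
              exact hb
            ·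
              have hr : pvRound end_ (m + 1) [⟨start, [start], 0⟩] = [] := by
                have h1 : pvRound end_ (m + 1) [⟨start, [start], 0⟩] =
                    pvRound end_ m ([⟨start, [start], 0⟩].flatMap (pvKids end_)) :=
                  pvRound_succ_left end_ m _
                rw [h1]
                have : [(⟨start, [start], 0⟩ : pvEnt)].flatMap (pvKids end_) = [] := by
                  simp [hkids]
                rw [this, pvRound_nil]
              rw [hr]
              rfl
          rw [pvStage_noHits end_ 12 _ _ hall]
      · -- the target is not a real key: it is never reached
        have hse : start ≠ end_ := by
          intro h
          have hz : pvMdist start end_ = 0 := (pvMdist_eq_zero start end_).2 h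
          rw [hz] at hH
          simp [pvRound, pvHits, h] at hH
        have hall : ∀ m, m < 12 → pvHits end_ (pvRound end_ m [⟨start, [start], 0⟩]) = [] := by
          intro m hm
          apply pvHits_nil_of
          intro e he hpe
          obtain ⟨-, -, -, hmempath, hv⟩ := pvInv start end_ m e he
          rcases hv e.pos hmempath with h | h
          · rw [hpe] at h
            exact hse h.symm
          · rw [hpe] at h
            exact hev h
        rw [pvStage_noHits end_ 12 _ _ hall]
    · -- B found paths: they are exactly A's first (and only) batch of hits
      have hsplit : (12:Nat) = pvMdist start end_ + (12 - pvMdist start end_) := by omega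
      have hcost : ∀ e ∈ pvRound end_ (pvMdist start end_) [⟨start, [start], 0⟩],
          e.cost = ((pvMdist start end_ : Nat) : Int) :=
        fun e he => (pvInv start end_ _ e he).1
      have h1 : (12 - pvMdist start end_) = (12 - pvMdist start end_ - 1) + 1 := by omega
      rw [hrun, hsplit, pvStage_add, hpre, h1]
      show (pvStage end_ _ ((pvRound end_ (pvMdist start end_) [⟨start, [start], 0⟩]).flatMap (pvKids end_))
        ((pvRound end_ (pvMdist start end_) [⟨start, [start], 0⟩]).foldl (pvUpd end_) (none, []))).2 = _
      rw [pvFold_first end_ _ _ hcost hH]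
      rw [pvStage_late end_ _ _ _ _ ?_]
      · rw [hB]
      · intro m e he
        have hr : pvRound end_ m ((pvRound end_ (pvMdist start end_) [⟨start, [start], 0⟩]).flatMap (pvKids end_)) =
            pvRound end_ (pvMdist start end_ + 1 + m) [⟨start, [start], 0⟩] := by
          rw [pvRound_add end_ (pvMdist start end_ + 1) m]
          rfl
        rw [hr] at he
        have := (pvInv start end_ _ e he).1
        rw [this]
        push_cast
        omega
  · -- start further than any simple path can run: both sides are empty
    have hAnil : (pvStage end_ 12 [⟨start, [start], 0⟩] (none, [])).2 = [] := by
      rw [pvStage_noHits end_ 12 _ _ ?_]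
      intro m hm
      exact pvNoHit end_ m ⟨start, [start], 0⟩ (by simp only; omega)
    have hBnil : pvRound end_ (pvMdist start end_) [⟨start, [start], 0⟩] = [] := by
      have h12 : pvMdist start end_ = 12 + (pvMdist start end_ - 12) := by omega
      rw [h12, pvRound_add, pvPigeon, pvRound_nil]
    rw [hrun, hAnil, hB, hBnil]
    rfl

-- ===== VERDICT (by name: the statement is the Claim_ definition above) =====
theorem bfs_min_cost_paths_spec : Claim_equal_bfs_min_cost_paths := by
  intro start end_ _
  unfold Spec_bfs_min_cost_paths
  exact pvMain start end_
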